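-- pv_equiv track=rewrite | github.com/mianzhang/CIDER | src/utils.py | label_to_spans
-- ===== SOURCE A (Python) =====
-- from typing import List, Tuple
--
-- def label_to_spans(label: List[int]):
--     '''
--     binary tagging scheme: label seq -> span tuples
--     '''
--     ret = []
--     i = 0
--     while i < len(label):
--         if label[i] == 1:
--             j = i + 1
--             while j < len(label) and label[j] == 1:
--                 j += 1
--             ret.append((i, j))
--             i = j
--         else:
--             i += 1
--     return ret
-- ===== SOURCE B (Python) =====
-- def label_to_spans(label):
--     '''
--     binary tagging scheme: label seq -> span tuples
--     '''
--     ret = []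
--     start = None
--     for i, v in enumerate(label):
--         if v == 1:
--             if start is None:
--                 start = i
--         else:
--             if start is not None:
--                 ret.append((start, i))
--                 start = None
--     if start is not None:
--         ret.append((start, len(label)))
--     return ret
-- ===== Notes on version B (the rewrite author's own statement) =====
-- stated objective: alternative
-- what changed: Replaces A's nested scan (outer index loop with an inner while that eats each run of 1s) by a single flat enumerate pass keeping a nullable start marker and emitting a span on each 1-to-non-1 transition, with a trailing flush.
import Mathlib
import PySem

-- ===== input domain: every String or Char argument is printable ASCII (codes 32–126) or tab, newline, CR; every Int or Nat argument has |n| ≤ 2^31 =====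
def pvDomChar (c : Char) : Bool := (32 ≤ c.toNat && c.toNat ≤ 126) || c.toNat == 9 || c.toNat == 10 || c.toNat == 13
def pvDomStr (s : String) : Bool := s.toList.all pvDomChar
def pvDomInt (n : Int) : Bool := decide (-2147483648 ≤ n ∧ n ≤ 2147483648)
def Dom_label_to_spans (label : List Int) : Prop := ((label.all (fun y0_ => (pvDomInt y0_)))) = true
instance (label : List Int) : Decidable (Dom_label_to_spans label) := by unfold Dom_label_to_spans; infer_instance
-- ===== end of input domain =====

-- B replaces A's nested scan by one flat pass with a nullable start marker (same cost, different decomposition).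

-- ===== PORT A =====
-- inner while: 'while j < len(label) and label[j] == 1: j += 1'
def pvAInner (label : List Int) (j : Nat) : Nat :=
  if h : j < label.length then
    if label[j] = 1 then pvAInner label (j + 1) else j
  else j
termination_by label.length - j

-- pvAInner never moves backwards (needed for pvAOuter's termination)
theorem pvAInner_ge (label : List Int) (j : Nat) : j ≤ pvAInner label j := by
  rw [pvAInner]
  split
  · split
    · have := pvAInner_ge label (j + 1); omega
    · omega
  · omega
termination_by label.length - j

-- outer while over the index i
def pvAOuter (label : List Int) (i : Nat) : List (Int × Int) :=
  if h : i < label.length then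
    if label[i] = 1 then
      let j := pvAInner label (i + 1)
      ((i : Int), (j : Int)) :: pvAOuter label j
    else pvAOuter label (i + 1)
  else []
termination_by label.length - i
decreasing_by
  · have := pvAInner_ge label (i + 1); omega
  · omega

def label_to_spans (label : List Int) : List (Int × Int) := pvAOuter label 0

-- ===== PORT B =====
-- 'for i, v in enumerate(label)' carrying (start, ret), then the trailing flush
def pvBLoop (l : List Int) (i : Int) (start : Option Int) (ret : List (Int × Int)) :
    List (Int × Int) :=
  match l with
  | [] =>
    match start with
    | none => ret
    | some s => ret ++ [(s, i)]
  | v :: t =>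
    if v = 1 then
      match start with
      | none => pvBLoop t (i + 1) (some i) ret
      | some s => pvBLoop t (i + 1) (some s) ret
    else
      match start with
      | none => pvBLoop t (i + 1) none ret
      | some s => pvBLoop t (i + 1) none (ret ++ [(s, i)])

def label_to_spans_alt (label : List Int) : List (Int × Int) := pvBLoop label 0 none []

-- ===== PRECONDITION & SPEC =====
def Spec_label_to_spans (label : List Int) (out : List (Int × Int)) : Prop := out = label_to_spans_alt label
instance (label : List Int) (out : List (Int × Int)) : Decidable (Spec_label_to_spans label out) := by unfold Spec_label_to_spans; infer_instance

-- ===== CLAIM (what is proved, stated in full; the proofs are below) =====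
def Claim_equal_label_to_spans : Prop := ∀ (label : List Int), Dom_label_to_spans label → Spec_label_to_spans label (label_to_spans label)

-- ===== LEMMAS AND PROOFS =====

-- pvAInner never overshoots the length
theorem pvAInner_le (label : List Int) (j : Nat) (h : j ≤ label.length) :
    pvAInner label j ≤ label.length := by
  rw [pvAInner]
  split
  · split
    · exact pvAInner_le label (j + 1) (by omega)
    · omega
  · omega
termination_by label.length - j

-- pvBLoop only appends to its accumulator
theorem pvBLoop_acc (l : List Int) (i : Int) (st : Option Int) (r : List (Int × Int)) :
    pvBLoop l i st r = r ++ pvBLoop l i st [] := by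
  induction l generalizing i st r with
  | nil => cases st <;> simp [pvBLoop]
  | cons v t ih =>
    by_cases h1 : v = 1 <;> cases st <;> simp only [pvBLoop, h1, if_pos, if_neg, not_false_iff]
    · rw [ih]
    · rw [ih]
    · rw [ih]
    · rw [ih (i + 1) none (r ++ [_]), ih (i + 1) none ([] ++ [_])]
      simp

-- with an open span, pvBLoop closes it exactly where pvAInner stops
theorem pvBLoop_run (label : List Int) (k : Nat) (s : Int) (hk : k ≤ label.length) :
    pvBLoop (label.drop k) (k : Int) (some s) [] =
      (s, ((pvAInner label k : Nat) : Int)) ::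
        pvBLoop (label.drop (pvAInner label k)) ((pvAInner label k : Nat) : Int) none [] := by
  by_cases h : k < label.length
  · have hd : label.drop k = label[k] :: label.drop (k + 1) := List.drop_eq_getElem_cons h
    by_cases h1 : label[k] = 1
    · have e : pvAInner label k = pvAInner label (k + 1) := by
        rw [pvAInner]; simp [h, h1]
      rw [hd]
      simp only [pvBLoop, h1, if_pos]
      have := pvBLoop_run label (k + 1) s (by omega)
      push_cast at this ⊢
      rw [e, this]
    · have e : pvAInner label k = k := by
        rw [pvAInner]; simp [h, h1]
      rw [e, hd]
      simp only [pvBLoop, h1, if_neg, not_false_iff]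
      rw [pvBLoop_acc]
      simp
  · have hk' : k = label.length := by omega
    have e : pvAInner label k = k := by rw [pvAInner]; simp [h]
    have hd : label.drop k = [] := List.drop_eq_nil_of_le (by omega)
    rw [e, hd]
    simp [pvBLoop, hk']
termination_by label.length - k

-- main invariant: A's outer loop from i equals B's flat pass over the remaining suffix
theorem pvMain (label : List Int) (k : Nat) (hk : k ≤ label.length) :
    pvAOuter label k = pvBLoop (label.drop k) (k : Int) none [] := by
  by_cases h : k < label.length
  · have hd : label.drop k = label[k] :: label.drop (k + 1) := List.drop_eq_getElem_cons h
    by_cases h1 : label[k] = 1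
    · have hj1 : k + 1 ≤ pvAInner label (k + 1) := pvAInner_ge label (k + 1)
      have hj2 : pvAInner label (k + 1) ≤ label.length := pvAInner_le label (k + 1) (by omega)
      rw [pvAOuter]
      simp only [h, dif_pos, h1, if_pos]
      rw [hd]
      simp only [pvBLoop, h1, if_pos]
      have hrun := pvBLoop_run label (k + 1) (k : Int) (by omega)
      push_cast at hrun ⊢
      rw [hrun, pvMain label (pvAInner label (k + 1)) hj2]
    · rw [pvAOuter]
      simp only [h, dif_pos, h1, if_neg, not_false_iff]
      rw [hd]
      simp only [pvBLoop, h1, if_neg, not_false_iff]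
      rw [pvMain label (k + 1) (by omega)]
      push_cast
      rfl
  · have hk' : k = label.length := by omega
    have hd : label.drop k = [] := List.drop_eq_nil_of_le (by omega)
    rw [pvAOuter, hd]
    simp [h, pvBLoop]
termination_by label.length - k
decreasing_by
  · have := pvAInner_ge label (k + 1); omega
  · omega

-- ===== VERDICT (by name: the statement is the Claim_ definition above) =====
theorem label_to_spans_spec : Claim_equal_label_to_spans := by
  intro label _
  unfold Spec_label_to_spans label_to_spans label_to_spans_alt
  simpa using pvMain label 0 (by omega)
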